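-- pv_equiv track=rewrite | github.com/abaldacchino/4chromprop | tilecheck/main.py | get_trans
-- ===== SOURCE A (Python) =====
-- def get_trans(triples, state, input_symbol):
--     if state == -1:
--         return input_symbol
--
--     match = -1
--     # trying to find if (state, input_symbol, y) is a triple in triples
--     for t in triples:
--         if t[0] == state and t[1] == input_symbol:
--             match = t[2]
--
--     if match == -1:  # case no match found
--         return -2
--     else:
--         return match
-- ===== SOURCE B (Python) =====
-- def get_trans(triples, state, input_symbol):
--     if state == -1:
--         return input_symbol
--     for t in reversed(triples):
--         if t[0] == state and t[1] == input_symbol: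
--             return t[2]
--     return -2
-- ===== Notes on version B (the rewrite author's own statement) =====
-- stated objective: alternative
-- what changed: Replaces A's full forward scan with a sentinel accumulator by a reverse scan that returns the first (i.e. last-in-order) matching transition immediately, with -2 only when the loop is exhausted.
-- intended difference: On inputs with state != -1 whose last matching triple carries the transition value -1, A's sentinel collides with that value and A returns -2 (no-match) while B returns the stored value -1, which is the intended last-match result. — e.g. on get_trans([(0, 0, -1)], 0, 0): A returns -2, B returns -1
import Mathlib
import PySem

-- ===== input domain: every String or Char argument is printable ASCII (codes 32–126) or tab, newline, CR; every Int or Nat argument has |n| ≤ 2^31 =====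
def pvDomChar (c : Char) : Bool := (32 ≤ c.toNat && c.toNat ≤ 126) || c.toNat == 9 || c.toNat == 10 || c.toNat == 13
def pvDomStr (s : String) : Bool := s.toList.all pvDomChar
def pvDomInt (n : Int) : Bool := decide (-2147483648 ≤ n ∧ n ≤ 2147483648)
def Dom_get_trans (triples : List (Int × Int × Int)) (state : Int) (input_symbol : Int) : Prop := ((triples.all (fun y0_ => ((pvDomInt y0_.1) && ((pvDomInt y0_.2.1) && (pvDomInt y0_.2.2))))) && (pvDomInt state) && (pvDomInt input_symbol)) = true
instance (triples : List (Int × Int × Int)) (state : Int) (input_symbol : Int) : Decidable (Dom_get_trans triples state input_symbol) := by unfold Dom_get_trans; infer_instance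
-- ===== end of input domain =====

-- B replaces A's forward scan with sentinel accumulator by an early-exit reverse scan (alternative
-- decomposition, same cost); where A's -1 sentinel collides with a stored transition value -1,
-- B returns the stored value (see D_get_trans below).


-- ===== PORT A =====
-- A: forward scan, last match kept in the sentinel accumulator `match` (init -1); -2 if sentinel untouched.
def get_trans (triples : List (Int × Int × Int)) (state : Int) (input_symbol : Int) : Int :=
  if state == -1 then input_symbol
  else
    let m := triples.foldl
      (fun m t => if t.1 == state && t.2.1 == input_symbol then t.2.2 else m) (-1)
    if m == -1 then -2 else m

-- ===== PORT B =====
-- B: scan reversed(triples), return the first match immediately; -2 when the loop is exhausted.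
def get_trans_alt_scan (state input_symbol : Int) : List (Int × Int × Int) → Int
  | [] => -2
  | t :: ts =>
    if t.1 == state && t.2.1 == input_symbol then t.2.2
    else get_trans_alt_scan state input_symbol ts

def get_trans_alt (triples : List (Int × Int × Int)) (state : Int) (input_symbol : Int) : Int :=
  if state == -1 then input_symbol
  else get_trans_alt_scan state input_symbol triples.reverse

-- ===== PRECONDITION & SPEC =====
-- On inputs with state ≠ -1 whose last matching triple carries the transition value -1, A's -1
-- sentinel collides with that value and A returns -2 (no-match) while B returns the stored -1,
-- which is the intended last-match result.
def D_get_trans (triples : List (Int × Int × Int)) (state : Int) (input_symbol : Int) : Prop :=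
  state ≠ -1 ∧
    ((triples.filter (fun t => t.1 == state && t.2.1 == input_symbol)).getLast?).map
      (fun t => t.2.2) = some (-1)
instance (triples : List (Int × Int × Int)) (state : Int) (input_symbol : Int) : Decidable (D_get_trans triples state input_symbol) := by unfold D_get_trans; infer_instance

def Spec_get_trans (triples : List (Int × Int × Int)) (state : Int) (input_symbol : Int) (out : Int) : Prop := ¬ D_get_trans triples state input_symbol → out = get_trans_alt triples state input_symbol
instance (triples : List (Int × Int × Int)) (state : Int) (input_symbol : Int) (out : Int) : Decidable (Spec_get_trans triples state input_symbol out) := by unfold Spec_get_trans; infer_instance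

def pvDiffWitness_get_trans : (List (Int × Int × Int)) × Int × Int := ([(0, 0, -1)], 0, 0)
def pvDiffWitnessOut_get_trans : Int × Int := (-2, -1)

-- ===== CLAIM (what is proved, stated in full; the proofs are below) =====
def Claim_unchanged_get_trans : Prop := ∀ (triples : List (Int × Int × Int)) (state : Int) (input_symbol : Int), Dom_get_trans triples state input_symbol → Spec_get_trans triples state input_symbol (get_trans triples state input_symbol)
def Claim_changed_get_trans : Prop := Dom_get_trans (pvDiffWitness_get_trans.1) (pvDiffWitness_get_trans.2.1) (pvDiffWitness_get_trans.2.2) ∧ D_get_trans (pvDiffWitness_get_trans.1) (pvDiffWitness_get_trans.2.1) (pvDiffWitness_get_trans.2.2) ∧ get_trans (pvDiffWitness_get_trans.1) (pvDiffWitness_get_trans.2.1) (pvDiffWitness_get_trans.2.2) = pvDiffWitnessOut_get_trans.1 ∧ get_trans_alt (pvDiffWitness_get_trans.1) (pvDiffWitness_get_trans.2.1) (pvDiffWitness_get_trans.2.2) = pvDiffWitnessOut_get_trans.2 ∧ pvDiffWitnessOut_get_trans.1 ≠ pvDiffWitnessOut_get_trans.2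
def Claim_exact_get_trans : Prop := ∀ (triples : List (Int × Int × Int)) (state : Int) (input_symbol : Int), Dom_get_trans triples state input_symbol → D_get_trans triples state input_symbol → get_trans triples state input_symbol ≠ get_trans_alt triples state input_symbol

-- ===== LEMMAS AND PROOFS =====

-- A's fold keeps the last matching value (or the initial sentinel).
theorem foldl_last_match (state input_symbol : Int) (l : List (Int × Int × Int)) (init : Int) :
    l.foldl (fun m t => if t.1 == state && t.2.1 == input_symbol then t.2.2 else m) init
      = (((l.filter (fun t => t.1 == state && t.2.1 == input_symbol)).getLast?).map
          (fun t => t.2.2)).getD init := by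
  induction l generalizing init with
  | nil => rfl
  | cons t ts ih =>
    simp only [List.foldl_cons, List.filter_cons]
    by_cases h : (t.1 == state && t.2.1 == input_symbol) = true
    · simp only [h, if_pos]
      rw [ih]
      cases hf : ts.filter (fun t => t.1 == state && t.2.1 == input_symbol) with
      | nil => simp
      | cons a as => simp [List.getLast?_cons]
    · simp only [h]
      rw [ih]
      simp

-- B's reverse scan returns the head match of the filtered reversed list (or -2).
theorem scan_first_match (state input_symbol : Int) (l : List (Int × Int × Int)) :
    get_trans_alt_scan state input_symbol l
      = (((l.filter (fun t => t.1 == state && t.2.1 == input_symbol)).head?).map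
          (fun t => t.2.2)).getD (-2) := by
  induction l with
  | nil => rfl
  | cons t ts ih =>
    simp only [get_trans_alt_scan, List.filter_cons]
    by_cases h : (t.1 == state && t.2.1 == input_symbol) = true
    · simp [h]
    · simp [h, ih]

theorem alt_eq_last (triples : List (Int × Int × Int)) (state input_symbol : Int)
    (hs : state ≠ -1) :
    get_trans_alt triples state input_symbol
      = (((triples.filter (fun t => t.1 == state && t.2.1 == input_symbol)).getLast?).map
          (fun t => t.2.2)).getD (-2) := by
  unfold get_trans_alt
  rw [if_neg (by simpa using hs)]
  rw [scan_first_match]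
  rw [List.filter_reverse, List.head?_reverse]

theorem get_trans_spec : Claim_unchanged_get_trans := by
  intro triples state input_symbol _ hnD
  unfold get_trans
  by_cases hs : state = -1
  · subst hs; simp [get_trans_alt]
  · rw [if_neg (by simpa using hs), alt_eq_last triples state input_symbol hs,
      foldl_last_match]
    cases hf : ((triples.filter (fun t => t.1 == state && t.2.1 == input_symbol)).getLast?) with
    | none => simp
    | some v =>
      simp only [Option.map_some, Option.getD_some]
      by_cases hv : v.2.2 = -1
      · exact absurd ⟨hs, by rw [hf]; simp [hv]⟩ hnD
      · simp [hv]

theorem get_trans_changed : Claim_changed_get_trans := by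
  unfold Claim_changed_get_trans; decide

theorem get_trans_tight : Claim_exact_get_trans := by
  intro triples state input_symbol _ hD
  obtain ⟨hs, hlast⟩ := hD
  unfold get_trans
  rw [if_neg (by simpa using hs), foldl_last_match,
    alt_eq_last triples state input_symbol hs]
  cases hf : ((triples.filter (fun t => t.1 == state && t.2.1 == input_symbol)).getLast?) with
  | none => rw [hf] at hlast; simp at hlast
  | some v =>
    rw [hf] at hlast
    simp only [Option.map_some, Option.some.injEq] at hlast
    simp [hlast]
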